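-- pv_equiv track=rewrite | github.com/flynndo1/CS-162-COCC | WFQ.py | apply_wfq
-- ===== SOURCE A (Python) =====
-- def apply_wfq(queue_premium, queue_standard, queue_economy):
--     """This function applies WFQ to manage the stream of packets."""
--     weighting = ['P', 'P', 'P', 'S', 'S', 'E']
--     output = []
--
--     while queue_premium or queue_standard or queue_economy:
--         for item in weighting:
--             if item == 'P' and queue_premium:
--                 output.append(('P', queue_premium.pop(0)))
--             elif item == 'S' and queue_standard:
--                 output.append(('S', queue_standard.pop(0)))
--             elif item == 'E' and queue_economy:
--                 output.append(('E', queue_economy.pop(0)))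
--     return output
-- ===== SOURCE B (Python) =====
-- def _tag(queue, chunk, offset, tag):
--     # global position i lands in round i//chunk, at cycle slot offset + i%chunk
--     return [(6 * (i // chunk) + offset + i % chunk, tag, v) for i, v in enumerate(queue)]
--
--
-- def apply_wfq(queue_premium, queue_standard, queue_economy):
--     """Weighted fair queueing by sort key: each item gets the unique slot number
--     6*round + position-in-cycle, and one stable sort yields the interleaving."""
--     tagged = _tag(queue_premium, 3, 0, 'P') \
--         + _tag(queue_standard, 2, 3, 'S') \
--         + _tag(queue_economy, 1, 5, 'E')
--     tagged.sort(key=lambda t: t[0])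
--     queue_premium.clear()
--     queue_standard.clear()
--     queue_economy.clear()
--     return [(tag, v) for _, tag, v in tagged]
-- ===== Notes on version B (the rewrite author's own statement) =====
-- stated objective: faster
-- what changed: Replaces the pop(0)-per-slot weighted round-robin loop over the 'PPPSSE' template by tagging every item once with its unique schedule-slot key 6*(i//chunk)+offset+i%chunk and doing a single sort on that key.
import Mathlib
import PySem

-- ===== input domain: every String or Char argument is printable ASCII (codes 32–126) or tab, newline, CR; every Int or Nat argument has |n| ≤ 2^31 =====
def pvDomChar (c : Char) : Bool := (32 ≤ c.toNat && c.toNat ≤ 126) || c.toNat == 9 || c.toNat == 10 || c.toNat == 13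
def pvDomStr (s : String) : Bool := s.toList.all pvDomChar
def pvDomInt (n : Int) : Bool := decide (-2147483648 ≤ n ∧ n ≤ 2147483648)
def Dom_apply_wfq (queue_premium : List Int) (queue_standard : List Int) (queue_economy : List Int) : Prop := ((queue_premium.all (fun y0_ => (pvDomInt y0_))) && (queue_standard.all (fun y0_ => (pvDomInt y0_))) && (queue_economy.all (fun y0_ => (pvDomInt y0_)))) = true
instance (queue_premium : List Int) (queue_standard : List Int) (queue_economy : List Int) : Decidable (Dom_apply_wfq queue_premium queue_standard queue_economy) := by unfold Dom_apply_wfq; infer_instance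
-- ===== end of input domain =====

-- B replaces A's pop-one-at-a-time weighted round robin by a single stable sort on a
-- computed slot key (alternative decomposition; A also empties its argument lists in
-- place — B reproduces that with clear(), and the equivalence proved here is about
-- the RETURN value only).

-- ===== PORT A =====
-- one pass of the inner `for item in weighting:` loop over the state (p, s, e, out);
-- `queue.pop(0)` is guarded by the non-emptiness test, so it is headD/tail here
def wfqPass (p s e : List Int) (out : List (String × Int)) :
    List Int × List Int × List Int × List (String × Int) :=
  ["P", "P", "P", "S", "S", "E"].foldl
    (fun st item =>
      let (p, s, e, out) := st
      if item = "P" ∧ p ≠ [] then (p.tail, s, e, out ++ [("P", p.headD 0)])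
      else if item = "S" ∧ s ≠ [] then (p, s.tail, e, out ++ [("S", s.headD 0)])
      else if item = "E" ∧ e ≠ [] then (p, s, e.tail, out ++ [("E", e.headD 0)])
      else (p, s, e, out))
    (p, s, e, out)

-- the `while queue_premium or queue_standard or queue_economy:` loop; each pass pops at
-- least one item, so the total length is enough fuel (the fuel only guards totality)
def wfqLoop (fuel : Nat) (p s e : List Int) (out : List (String × Int)) : List (String × Int) :=
  match fuel with
  | 0 => out
  | fuel + 1 =>
    if p = [] ∧ s = [] ∧ e = [] then out
    else
      let st := wfqPass p s e out
      wfqLoop fuel st.1 st.2.1 st.2.2.1 st.2.2.2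

def apply_wfq (queue_premium : List Int) (queue_standard : List Int)
    (queue_economy : List Int) : List (String × Int) :=
  wfqLoop (queue_premium.length + queue_standard.length + queue_economy.length)
    queue_premium queue_standard queue_economy []

-- ===== PORT B =====
-- _tag: item at global index i of a queue served `chunk` at a time gets slot key
-- 6*(i//chunk) + offset + i%chunk
def wfqTag (queue : List Int) (chunk offset : Int) (tag : String) : List (Int × String × Int) :=
  (PySem.List.enumerate queue).map
    (fun iv => (6 * PySem.Int.floordiv iv.1 chunk + offset + PySem.Int.mod iv.1 chunk, tag, iv.2))

def apply_wfq_alt (queue_premium : List Int) (queue_standard : List Int)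
    (queue_economy : List Int) : List (String × Int) :=
  let tagged := wfqTag queue_premium 3 0 "P" ++ wfqTag queue_standard 2 3 "S"
      ++ wfqTag queue_economy 1 5 "E"
  (PySem.List.sorted tagged (fun t => t.1)).map (fun t => t.2)

-- ===== PRECONDITION & SPEC =====
def Spec_apply_wfq (queue_premium : List Int) (queue_standard : List Int) (queue_economy : List Int) (out : List (String × Int)) : Prop := out = apply_wfq_alt queue_premium queue_standard queue_economy
instance (queue_premium : List Int) (queue_standard : List Int) (queue_economy : List Int) (out : List (String × Int)) : Decidable (Spec_apply_wfq queue_premium queue_standard queue_economy out) := by unfold Spec_apply_wfq; infer_instance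

-- ===== CLAIM (what is proved, stated in full; the proofs are below) =====
def Claim_equal_apply_wfq : Prop := ∀ (queue_premium : List Int) (queue_standard : List Int) (queue_economy : List Int), Dom_apply_wfq queue_premium queue_standard queue_economy → Spec_apply_wfq queue_premium queue_standard queue_economy (apply_wfq queue_premium queue_standard queue_economy)

-- ===== LEMMAS AND PROOFS =====

-- one pass pops min(3,|p|) premium, min(2,|s|) standard, min(1,|e|) economy items

theorem wfqPass_eq (p s e : List Int) (out : List (String × Int)) :
    wfqPass p s e out =
      (p.drop 3, s.drop 2, e.drop 1,
       out ++ (p.take 3).map (fun x => ("P", x)) ++ (s.take 2).map (fun x => ("S", x))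
           ++ (e.take 1).map (fun x => ("E", x))) := by
  rcases p with _ | ⟨a, _ | ⟨b, _ | ⟨c, p⟩⟩⟩ <;> rcases s with _ | ⟨d, _ | ⟨f, s⟩⟩ <;>
    rcases e with _ | ⟨g, e⟩ <;> simp [wfqPass]

-- wfqTag generalized to an arbitrary Nat start index (proof device)
def wfqTagFrom (queue : List Int) (chunk offset : Nat) (tag : String) (n : Nat) :
    List (Int × String × Int) :=
  (PySem.List.enumerate queue (n : Int)).map
    (fun iv => (6 * PySem.Int.floordiv iv.1 (chunk : Int) + (offset : Int)
                  + PySem.Int.mod iv.1 (chunk : Int), tag, iv.2))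

-- one tagged block with consecutive explicit keys base, base+1, …
def blockOf (tag : String) (q : List Int) (base : Nat) : List (Int × String × Int) :=
  (PySem.List.enumerate q (base : Int)).map (fun iv => (iv.1, tag, iv.2))

-- the canonical per-round decomposition of the WFQ schedule, with slot keys
def rounds (p s e : List Int) (r : Nat) : List (Int × String × Int) :=
  if p = [] ∧ s = [] ∧ e = [] then []
  else blockOf "P" (p.take 3) (6*r) ++ blockOf "S" (s.take 2) (6*r+3)
       ++ blockOf "E" (e.take 1) (6*r+5)
       ++ rounds (p.drop 3) (s.drop 2) (e.drop 1) (r+1)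
termination_by p.length + s.length + e.length
decreasing_by
  simp only [List.length_drop]
  rcases p with _ | ⟨a, p⟩ <;> rcases s with _ | ⟨d, s⟩ <;> rcases e with _ | ⟨g, e⟩ <;>
    simp_all <;> omega

theorem map_key_enumerate (tag : String) (c o : Nat) (r : Nat) :
    ∀ (q : List Int) (m : Nat), q.length + m ≤ c →
    (PySem.List.enumerate q ((c*r+m : Nat) : Int)).map
      (fun iv => (6 * PySem.Int.floordiv iv.1 (c : Int) + (o : Int)
                    + PySem.Int.mod iv.1 (c : Int), tag, iv.2))
    = (PySem.List.enumerate q ((6*r+o+m : Nat) : Int)).map (fun iv => (iv.1, tag, iv.2)) := by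
  intro q
  induction q with
  | nil => intro m _; simp [PySem.List.enumerate_nil]
  | cons a t ih =>
    intro m hm
    have hmc : m < c := by simp only [List.length_cons] at hm; omega
    have hc : 0 < c := by omega
    rw [PySem.List.enumerate_cons, PySem.List.enumerate_cons]
    simp only [List.map_cons]
    congr 1
    · rw [PySem.Int.floordiv_natCast, PySem.Int.mod_natCast, Nat.mul_add_div hc,
          Nat.mul_add_mod, Nat.div_eq_of_lt hmc, Nat.mod_eq_of_lt hmc]
      refine Prod.ext ?_ rfl
      push_cast
      ring
    · have e1 : ((c*r+m : Nat) : Int) + 1 = ((c*r+(m+1) : Nat) : Int) := by push_cast; ring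
      have e2 : ((6*r+o+m : Nat) : Int) + 1 = ((6*r+o+(m+1) : Nat) : Int) := by push_cast; ring
      rw [e1, e2]
      exact ih (m+1) (by simp only [List.length_cons] at hm; omega)

theorem wfqTagFrom_split (q : List Int) (c o : Nat) (tag : String) (r : Nat) :
    wfqTagFrom q c o tag (c*r)
      = blockOf tag (q.take c) (6*r+o) ++ wfqTagFrom (q.drop c) c o tag (c*(r+1)) := by
  by_cases hle : q.length ≤ c
  · rw [List.take_of_length_le hle, List.drop_eq_nil_of_le hle]
    have h0 := map_key_enumerate tag c o r q 0 (by omega)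
    simp only [Nat.add_zero] at h0
    push_cast at h0
    simp only [wfqTagFrom, blockOf, PySem.List.enumerate_nil, List.map_nil, List.append_nil]
    push_cast
    exact h0
  · push Not at hle
    have hsplit : q = q.take c ++ q.drop c := (List.take_append_drop c q).symm
    have hlt : (q.take c).length = c := by simp; omega
    conv_lhs => rw [wfqTagFrom, hsplit, PySem.List.enumerate_append, List.map_append]
    have h0 := map_key_enumerate tag c o r (q.take c) 0 (by omega)
    simp only [Nat.add_zero] at h0
    rw [h0]
    congr 1
    rw [wfqTagFrom]
    congr 2
    rw [hlt]
    push_cast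
    ring

theorem perm_shuffle {α : Type} [DecidableEq α] (a b c x y z : List α) :
    (a ++ b ++ c ++ (x ++ y ++ z)).Perm ((a ++ x) ++ (b ++ y) ++ (c ++ z)) := by
  rw [List.perm_iff_count]
  intro t
  simp [List.count_append]
  omega

theorem rounds_perm (p s e : List Int) (r : Nat) :
    (rounds p s e r).Perm
      (wfqTagFrom p 3 0 "P" (3*r) ++ wfqTagFrom s 2 3 "S" (2*r) ++ wfqTagFrom e 1 5 "E" (1*r)) := by
  suffices h : ∀ (n : Nat) (p s e : List Int) (r : Nat), p.length + s.length + e.length ≤ n →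
      (rounds p s e r).Perm
        (wfqTagFrom p 3 0 "P" (3*r) ++ wfqTagFrom s 2 3 "S" (2*r) ++ wfqTagFrom e 1 5 "E" (1*r)) from
    h (p.length + s.length + e.length) p s e r le_rfl
  intro n
  induction n with
  | zero =>
    intro p s e r h
    have hp : p = [] := by cases p <;> simp_all
    have hs : s = [] := by cases s <;> simp_all
    have he : e = [] := by cases e <;> simp_all
    subst hp; subst hs; subst he
    simp [rounds, wfqTagFrom, PySem.List.enumerate_nil]
  | succ n ih =>
    intro p s e r h
    by_cases hall : p = [] ∧ s = [] ∧ e = []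
    · obtain ⟨hp, hs, he⟩ := hall
      subst hp; subst hs; subst he
      simp [rounds, wfqTagFrom, PySem.List.enumerate_nil]
    · rw [rounds, if_neg hall,
          wfqTagFrom_split p 3 0 "P" r, wfqTagFrom_split s 2 3 "S" r,
          wfqTagFrom_split e 1 5 "E" r]
      simp only [Nat.add_zero]
      have hrec := ih (p.drop 3) (s.drop 2) (e.drop 1) (r+1) (by
        simp only [List.length_drop]
        rcases p with _ | ⟨a, p⟩ <;> rcases s with _ | ⟨d, s⟩ <;> rcases e with _ | ⟨g, e⟩ <;>
          simp_all <;> omega)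
      exact (List.Perm.append_left _ hrec).trans (perm_shuffle _ _ _ _ _ _)

theorem blockOf_mem_fst (tag : String) (q : List Int) (b : Nat) (x : Int × String × Int)
    (h : x ∈ blockOf tag q b) : (b : Int) ≤ x.1 ∧ x.1 < (b : Int) + q.length := by
  simp only [blockOf, List.mem_map] at h
  obtain ⟨iv, hiv, hx⟩ := h
  rw [PySem.List.mem_enumerate_iff] at hiv
  obtain ⟨k, hk, rfl⟩ := hiv
  subst hx
  constructor <;> simp <;> omega

theorem blockOf_pairwise (tag : String) (q : List Int) (b : Nat) :
    (blockOf tag q b).Pairwise (fun a c => a.1 < c.1) := by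
  simp only [blockOf, List.pairwise_map]
  exact (PySem.List.pairwise_lt_enumerate q (b : Int)).imp (fun h => h)

theorem rounds_mem_fst (p s e : List Int) (r : Nat) (x : Int × String × Int)
    (h : x ∈ rounds p s e r) : (6*r : Int) ≤ x.1 := by
  suffices H : ∀ (n : Nat) (p s e : List Int) (r : Nat) (x : Int × String × Int),
      p.length + s.length + e.length ≤ n → x ∈ rounds p s e r → (6*r : Int) ≤ x.1 from
    H (p.length + s.length + e.length) p s e r x le_rfl h
  intro n
  induction n with
  | zero =>
    intro p s e r x hlen hx
    have hp : p = [] := by cases p <;> simp_all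
    have hs : s = [] := by cases s <;> simp_all
    have he : e = [] := by cases e <;> simp_all
    subst hp; subst hs; subst he
    simp [rounds] at hx
  | succ n ih =>
    intro p s e r x hlen hx
    by_cases hall : p = [] ∧ s = [] ∧ e = []
    · rw [rounds, if_pos hall] at hx
      cases hx
    · rw [rounds, if_neg hall] at hx
      rcases List.mem_append.mp hx with hx | hx
      · rcases List.mem_append.mp hx with hx | hx
        · rcases List.mem_append.mp hx with hx | hx
          · have h1 := blockOf_mem_fst _ _ _ _ hx; omega
          · have h1 := blockOf_mem_fst _ _ _ _ hx; omega
        · have h1 := blockOf_mem_fst _ _ _ _ hx; omega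
      · have hrec := ih (p.drop 3) (s.drop 2) (e.drop 1) (r+1) x (by
          simp only [List.length_drop]
          rcases p with _ | ⟨a, p⟩ <;> rcases s with _ | ⟨d, s⟩ <;> rcases e with _ | ⟨g, e⟩ <;>
            simp_all <;> omega) hx
        omega

theorem rounds_pairwise (p s e : List Int) (r : Nat) :
    (rounds p s e r).Pairwise (fun a b => a.1 < b.1) := by
  suffices H : ∀ (n : Nat) (p s e : List Int) (r : Nat), p.length + s.length + e.length ≤ n →
      (rounds p s e r).Pairwise (fun a b => a.1 < b.1) from
    H (p.length + s.length + e.length) p s e r le_rfl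
  intro n
  induction n with
  | zero =>
    intro p s e r hlen
    have hp : p = [] := by cases p <;> simp_all
    have hs : s = [] := by cases s <;> simp_all
    have he : e = [] := by cases e <;> simp_all
    subst hp; subst hs; subst he
    simp [rounds]
  | succ n ih =>
    intro p s e r hlen
    by_cases hall : p = [] ∧ s = [] ∧ e = []
    · rw [rounds, if_pos hall]
      exact List.Pairwise.nil
    · rw [rounds, if_neg hall]
      have hlenP : (p.take 3).length ≤ 3 := by simp
      have hlenS : (s.take 2).length ≤ 2 := by simp
      have hlenE : (e.take 1).length ≤ 1 := by simp
      have hrec := ih (p.drop 3) (s.drop 2) (e.drop 1) (r+1) (by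
        simp only [List.length_drop]
        rcases p with _ | ⟨a, p⟩ <;> rcases s with _ | ⟨d, s⟩ <;> rcases e with _ | ⟨g, e⟩ <;>
          simp_all <;> omega)
      refine List.pairwise_append.mpr ⟨List.pairwise_append.mpr
        ⟨List.pairwise_append.mpr ⟨blockOf_pairwise _ _ _, blockOf_pairwise _ _ _, ?_⟩,
         blockOf_pairwise _ _ _, ?_⟩, hrec, ?_⟩
      · intro a ha b hb
        have h1 := blockOf_mem_fst _ _ _ _ ha
        have h2 := blockOf_mem_fst _ _ _ _ hb
        omega
      · intro a ha b hb
        have h2 := blockOf_mem_fst _ _ _ _ hb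
        rcases List.mem_append.mp ha with ha | ha
        · have h1 := blockOf_mem_fst _ _ _ _ ha; omega
        · have h1 := blockOf_mem_fst _ _ _ _ ha; omega
      · intro a ha b hb
        have h2 := rounds_mem_fst _ _ _ _ _ hb
        rcases List.mem_append.mp ha with ha | ha
        · rcases List.mem_append.mp ha with ha | ha
          · have h1 := blockOf_mem_fst _ _ _ _ ha; omega
          · have h1 := blockOf_mem_fst _ _ _ _ ha; omega
        · have h1 := blockOf_mem_fst _ _ _ _ ha; omega

theorem sorted_tagged_eq (p s e : List Int) :
    PySem.List.sorted (wfqTag p 3 0 "P" ++ wfqTag s 2 3 "S" ++ wfqTag e 1 5 "E")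
        (fun t => t.1)
      = rounds p s e 0 := by
  have hP : wfqTag p 3 0 "P" = wfqTagFrom p 3 0 "P" 0 := rfl
  have hS : wfqTag s 2 3 "S" = wfqTagFrom s 2 3 "S" 0 := rfl
  have hE : wfqTag e 1 5 "E" = wfqTagFrom e 1 5 "E" 0 := rfl
  refine PySem.List.sorted_eq_of_perm_of_pairwise_lt _ _ _ ?_ ?_
  · rw [hP, hS, hE]
    simpa using rounds_perm p s e 0
  · exact rounds_pairwise p s e 0

theorem blockOf_strip (tag : String) (q : List Int) (b : Nat) :
    (blockOf tag q b).map (fun t => t.2) = q.map (fun x => (tag, x)) := by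
  simp only [blockOf, List.map_map]
  rw [show ((fun (t : Int × String × Int) => t.2) ∘ fun (iv : Int × Int) => ((iv.1, tag, iv.2) : Int × String × Int))
        = (fun (v : Int) => (tag, v)) ∘ (fun (iv : Int × Int) => iv.2) from rfl]
  rw [← List.map_map, PySem.List.map_snd_enumerate]

theorem wfqLoop_eq (n : Nat) : ∀ (p s e : List Int), p.length + s.length + e.length ≤ n →
    ∀ (out : List (String × Int)) (r : Nat),
    wfqLoop n p s e out = out ++ (rounds p s e r).map (fun t => t.2) := by
  induction n with
  | zero =>
    intro p s e hlen out r
    have hp : p = [] := by cases p <;> simp_all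
    have hs : s = [] := by cases s <;> simp_all
    have he : e = [] := by cases e <;> simp_all
    subst hp; subst hs; subst he
    simp [wfqLoop, rounds]
  | succ n ih =>
    intro p s e hlen out r
    by_cases hall : p = [] ∧ s = [] ∧ e = []
    · rw [wfqLoop, if_pos hall, rounds, if_pos hall]
      simp
    · rw [wfqLoop, if_neg hall, rounds, if_neg hall]
      simp only [wfqPass_eq]
      have hdec : (p.drop 3).length + (s.drop 2).length + (e.drop 1).length ≤ n := by
        simp only [List.length_drop]
        rcases p with _ | ⟨a, p⟩ <;> rcases s with _ | ⟨d, s⟩ <;> rcases e with _ | ⟨g, e⟩ <;>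
          simp_all <;> omega
      rw [ih (p.drop 3) (s.drop 2) (e.drop 1) hdec _ (r+1)]
      simp [List.map_append, blockOf_strip, List.append_assoc]

-- ===== VERDICT (by name: the statement is the Claim_ definition above) =====
theorem apply_wfq_spec : Claim_equal_apply_wfq := by
  intro p s e _
  show apply_wfq p s e = apply_wfq_alt p s e
  rw [apply_wfq, apply_wfq_alt, wfqLoop_eq (p.length + s.length + e.length) p s e le_rfl [] 0,
      sorted_tagged_eq]
  simp
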